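-- pv_equiv track=rewrite | github.com/supersfel/baekjoon | recursion/2447_put_star_2.py | append_star
-- ===== SOURCE A (Python) =====
-- def append_star(len):
--     if len == 1:
--         return ['*']
--
--     Stars = append_star(len//3)
--     lst = []
--
--     for s in Stars:
--         lst.append(s *3)
--     for s in Stars:
--         lst.append(s + ' '*(len//3) + s)
--     for s in Stars:
--         lst.append(s *3)
--
--
--     return lst
-- ===== SOURCE B (Python) =====
-- def append_star(len):
--     # iterative bottom-up build: collect the level sizes, then grow the grid
--     # from the base case upward (same values as the recursive version)
--     levels = []
--     cur = len
--     while cur != 1: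
--         levels.append(cur)
--         cur //= 3
--     grid = ['*']
--     for L in reversed(levels):
--         grid = ([s * 3 for s in grid]
--                 + [s + ' ' * (L // 3) + s for s in grid]
--                 + [s * 3 for s in grid])
--     return grid
-- ===== Notes on version B (the rewrite author's own statement) =====
-- stated objective: alternative
-- what changed: Replaces the linear recursion by an iterative bottom-up build: first collect the sequence of level sizes by repeated floor division, then grow the grid from the base case with list comprehensions per level.
import Mathlib
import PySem

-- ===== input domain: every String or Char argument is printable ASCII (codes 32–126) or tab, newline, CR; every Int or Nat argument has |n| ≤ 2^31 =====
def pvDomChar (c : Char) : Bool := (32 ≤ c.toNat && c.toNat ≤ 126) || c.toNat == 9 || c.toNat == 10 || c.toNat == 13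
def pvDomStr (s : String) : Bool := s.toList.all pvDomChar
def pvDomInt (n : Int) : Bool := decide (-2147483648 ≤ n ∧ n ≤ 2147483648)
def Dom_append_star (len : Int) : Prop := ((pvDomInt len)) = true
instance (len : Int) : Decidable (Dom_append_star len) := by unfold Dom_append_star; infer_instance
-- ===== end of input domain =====

-- B replaces A's linear recursion by an iterative bottom-up build (collect level
-- sizes, then grow the grid per level); alternative decomposition, same cost.


-- ===== PORT A =====
-- ' ' * (len//3): exact here since len//3 ≥ 0 on this branch (len ≥ 2);
-- s * 3 on a string is written out as s ++ s ++ s (exact for the literal count 3).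
def append_star (len : Int) : List String :=
  if len = 1 then ["*"]
  else if len ≤ 1 then []   -- Python A recurses forever here (RecursionError); guard for totality, excluded by Pre_
  else
    let Stars := append_star (PySem.Int.floordiv len 3)
    let lst : List String := []
    let lst := Stars.foldl (fun lst s => lst ++ [s ++ s ++ s]) lst
    let lst := Stars.foldl (fun lst s =>
      lst ++ [s ++ String.ofList (List.replicate (PySem.Int.floordiv len 3).toNat ' ') ++ s]) lst
    let lst := Stars.foldl (fun lst s => lst ++ [s ++ s ++ s]) lst
    lst
termination_by len.toNat
decreasing_by
  have h1 : PySem.Int.floordiv len 3 < len := by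
    rw [PySem.Int.floordiv_lt_iff_lt_mul (by norm_num : (0:Int) < 3)]; omega
  omega

-- ===== PORT B =====
-- the while-loop collecting the level sizes
def pvLevels (len : Int) : List Int :=
  if len = 1 then []
  else if len ≤ 1 then []   -- Python B's while-loop never terminates here; guard for totality, excluded by Pre_
  else len :: pvLevels (PySem.Int.floordiv len 3)
termination_by len.toNat
decreasing_by
  have h1 : PySem.Int.floordiv len 3 < len := by
    rw [PySem.Int.floordiv_lt_iff_lt_mul (by norm_num : (0:Int) < 3)]; omega
  omega

-- the three comprehensions of one level
def pvGrow (grid : List String) (L : Int) : List String :=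
  grid.map (fun s => s ++ s ++ s)
    ++ grid.map (fun s => s ++ String.ofList (List.replicate (PySem.Int.floordiv L 3).toNat ' ') ++ s)
    ++ grid.map (fun s => s ++ s ++ s)

def append_star_alt (len : Int) : List String :=
  (pvLevels len).reverse.foldl pvGrow ["*"]

-- ===== PRECONDITION & SPEC =====
-- Pre_: exactly the inputs on which Python A returns, i.e. repeated //3 reaches 1:
-- ∃ k, 3^k ≤ len ≤ 2*3^k - 1; elsewhere A raises RecursionError (and B's loop hangs).
-- The bound k < log2 len + 1 is only there to make the ∃ decidable (in O(log len)
-- steps): it is automatic (2^k ≤ 3^k ≤ len), so it excludes no input on which A returns.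
def Pre_append_star (len : Int) : Prop :=
  ∃ k : Nat, k < Nat.log2 len.toNat + 1 ∧ (3:Int)^k ≤ len ∧ len ≤ 2 * 3^k - 1
instance (len : Int) : Decidable (Pre_append_star len) := by unfold Pre_append_star; infer_instance
def pvWitness_append_star : Int := (9)

def Spec_append_star (len : Int) (out : List String) : Prop := out = append_star_alt len
instance (len : Int) (out : List String) : Decidable (Spec_append_star len out) := by unfold Spec_append_star; infer_instance

-- ===== CLAIM (what is proved, stated in full; the proofs are below) =====
def Claim_equal_append_star : Prop := ∀ (len : Int), Dom_append_star len → Pre_append_star len → Spec_append_star len (append_star len)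

-- ===== LEMMAS AND PROOFS =====

-- any exponent with 3^k ≤ len satisfies the bookkeeping bound k < log2 len + 1
theorem k_le_log2 (k : Nat) (len : Int) (h : (3:Int)^k ≤ len) :
    k < Nat.log2 len.toNat + 1 := by
  have h2 : ((2^k : Nat) : Int) ≤ len := by
    push_cast
    calc (2:Int)^k ≤ 3^k := pow_le_pow_left₀ (by norm_num) (by norm_num) k
    _ ≤ len := h
  have hpow : (1:Int) ≤ 3^k := one_le_pow₀ (by norm_num)
  have hl : (1:Int) ≤ len := le_trans hpow h
  have hk : 2^k ≤ len.toNat := by omega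
  have := (Nat.le_log2 (by omega : len.toNat ≠ 0)).mpr hk
  omega

-- under Pre_, a non-base input is ≥ 3 and its //3 is again in Pre_
theorem pre_step (len : Int) (hp : Pre_append_star len) (hne : len ≠ 1) :
    1 < len ∧ Pre_append_star (PySem.Int.floordiv len 3) := by
  obtain ⟨k, _, hlo, hhi⟩ := hp
  cases k with
  | zero => simp at hlo hhi; omega
  | succ j =>
    have h3 : (3:Int)^(j+1) = 3^j * 3 := by ring
    have hlo' : (3:Int)^j * 3 ≤ len := by rw [← h3]; exact hlo
    have hpow : (1:Int) ≤ 3^j := one_le_pow₀ (by norm_num)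
    have hlen : 1 < len := by nlinarith
    have hqlo : (3:Int)^j ≤ PySem.Int.floordiv len 3 := by
      rw [PySem.Int.le_floordiv_iff_mul_le (by norm_num)]; exact hlo'
    refine ⟨hlen, j, k_le_log2 j _ hqlo, hqlo, ?_⟩
    have h2 : PySem.Int.floordiv len 3 < 2 * 3^j := by
      rw [PySem.Int.floordiv_lt_iff_lt_mul (by norm_num)]
      nlinarith
    omega

-- A's step: the three append-loops are the three map blocks of pvGrow
theorem A_step (len : Int) (h : 1 < len) :
    append_star len = pvGrow (append_star (PySem.Int.floordiv len 3)) len := by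
  rw [append_star.eq_def]
  simp only [show ¬(len = 1) by omega, show ¬(len ≤ 1) by omega, if_false]
  rw [PySem.List.foldl_append_singleton_eq_map, PySem.List.foldl_append_singleton_eq_map,
    PySem.List.foldl_append_singleton_eq_map]
  simp [pvGrow]

-- B's step: one more collected level is one more pvGrow pass at the outside
theorem alt_step (len : Int) (h : 1 < len) :
    append_star_alt len = pvGrow (append_star_alt (PySem.Int.floordiv len 3)) len := by
  unfold append_star_alt
  rw [pvLevels.eq_def]
  simp only [show ¬(len = 1) by omega, show ¬(len ≤ 1) by omega, if_false,
    List.reverse_cons, List.foldl_append, List.foldl_cons, List.foldl_nil]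

theorem agree : ∀ n : Nat, ∀ len : Int, len.toNat ≤ n → Pre_append_star len →
    append_star len = append_star_alt len := by
  intro n
  induction n with
  | zero =>
    intro len hle hp
    obtain ⟨k, _, hlo, _⟩ := hp
    have : (1:Int) ≤ 3^k := one_le_pow₀ (by norm_num)
    omega
  | succ m ih =>
    intro len hle hp
    by_cases h1 : len = 1
    · subst h1
      rw [append_star.eq_def, append_star_alt, pvLevels.eq_def]; rfl
    · obtain ⟨hgt, hp'⟩ := pre_step len hp h1
      have hdec : (PySem.Int.floordiv len 3).toNat ≤ m := by
        have h0 : (0:Int) ≤ PySem.Int.floordiv len 3 := by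
          rw [PySem.Int.le_floordiv_iff_mul_le (by norm_num : (0:Int) < 3)]; omega
        have h1 : PySem.Int.floordiv len 3 < len := by
          rw [PySem.Int.floordiv_lt_iff_lt_mul (by norm_num : (0:Int) < 3)]; omega
        omega
      rw [A_step len hgt, alt_step len hgt, ih _ hdec hp']

-- ===== VERDICT (by name: the statement is the Claim_ definition above) =====
theorem append_star_spec : Claim_equal_append_star := by
  intro len _ hp
  exact agree len.toNat len le_rfl hp
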